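-- pv_equiv track=rewrite | github.com/ChakradharG/CompetitiveCoding | LeetCode/Chakradhar/2569.py | handleQuery
-- ===== SOURCE A (Python) =====
-- from typing import List
--
-- class ST:
-- 	def __init__(self, a):
-- 		n = len(a)
-- 		self.a = a
-- 		self.tree = [0 for _ in range(4*n)]	# count of 1s
-- 		self.lazy = [False for _ in range(4*n)] # pending flip
-- 		self._build(0, 0, n)
--
-- 	def _merge(self, lst, rst):
-- 		return lst + rst
--
-- 	def _apply(self, i, s, e):
-- 		if self.lazy[i]:
-- 			self.tree[i] = (e - s) - self.tree[i]   # updated 1s = len of segment - old 1s, since 0/1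
-- 			if e - s > 1:
-- 				self.lazy[2*i+1] = not self.lazy[2*i+1]
-- 				self.lazy[2*i+2] = not self.lazy[2*i+2]
-- 			self.lazy[i] = False
--
-- 	def _build(self, i, s, e):
-- 		if e - s == 1:
-- 			self.tree[i] = self.a[s]
-- 		else:
-- 			m = s + (e - s) // 2
-- 			self._build(2*i+1, s, m)
-- 			self._build(2*i+2, m, e)
-- 			self.tree[i] = self._merge(
-- 				self.tree[2*i+1],
-- 				self.tree[2*i+2]
-- 			)
--
-- 	def update(self, i, s, e, l, r):
-- 		self._apply(i, s, e)
-- 		if s >= r or e <= l: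
-- 			return
-- 		elif l <= s and e <= r:
-- 			self.lazy[i] = True
-- 			self._apply(i, s, e)
-- 		else:
-- 			m = s + (e - s) // 2
-- 			self.update(2*i+1, s, m, l, r)
-- 			self.update(2*i+2, m, e, l, r)
-- 			self.tree[i] = self._merge(
-- 				self.tree[2*i+1],
-- 				self.tree[2*i+2]
-- 			)
--
-- def handleQuery(nums1: List[int], nums2: List[int], queries: List[List[int]]) -> List[int]:
--     st = ST(nums1)
--     n = len(nums1)
--     s = sum(nums2)
--
--     ans = []
--     for x, y, z in queries:
--         if x == 1:
--             # update [y, z]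
--             st.update(0, 0, n, y, z+1)
--         elif x == 2:
--             # number of times p is added to the sum
--             # is the same as the number of 1s in nums1 at that point
--             s += (y * st.tree[0])
--         else:
--             ans.append(s)
--
--     return ans
-- ===== SOURCE B (Python) =====
-- from typing import List
--
-- def handleQuery(nums1: List[int], nums2: List[int], queries: List[List[int]]) -> List[int]:
--     arr = list(nums1)
--     n = len(arr)
--     ones = sum(arr)
--     s = sum(nums2)
--     ans = []
--     for x, y, z in queries:
--         if x == 1:
--             for i in range(max(y, 0), min(z + 1, n)):
--                 ones += 1 - 2 * arr[i]
--                 arr[i] = 1 - arr[i]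
--         elif x == 2:
--             s += y * ones
--         else:
--             ans.append(s)
--     return ans
-- ===== Notes on version B (the rewrite author's own statement) =====
-- stated objective: simpler
-- what changed: Replaces the lazy segment tree (build/apply/update over 4n-sized tree and lazy arrays) with a plain copied array plus one running counter ones=sum(arr), flipping elements directly on each range-flip query.
import Mathlib
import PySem

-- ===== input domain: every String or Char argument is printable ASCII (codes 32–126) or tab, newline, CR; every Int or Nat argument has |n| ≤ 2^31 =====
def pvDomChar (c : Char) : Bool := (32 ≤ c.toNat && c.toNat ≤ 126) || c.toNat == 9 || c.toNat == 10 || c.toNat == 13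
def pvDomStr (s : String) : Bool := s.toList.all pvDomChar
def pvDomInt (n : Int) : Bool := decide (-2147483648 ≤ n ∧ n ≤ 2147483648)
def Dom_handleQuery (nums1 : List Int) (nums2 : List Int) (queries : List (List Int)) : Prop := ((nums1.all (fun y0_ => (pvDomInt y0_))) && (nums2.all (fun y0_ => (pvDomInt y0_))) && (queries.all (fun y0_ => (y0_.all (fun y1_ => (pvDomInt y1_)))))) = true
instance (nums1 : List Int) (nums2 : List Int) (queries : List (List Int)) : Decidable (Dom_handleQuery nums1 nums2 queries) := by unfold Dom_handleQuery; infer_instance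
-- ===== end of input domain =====

-- B replaces A's lazy segment tree by a plain copied array plus one running counter
-- ones = sum(arr) (objective: simpler; same return value, no mutation of the arguments).

-- ===== PORT A =====
-- A's tree/lazy are Python lists of size 4n updated by index; they are ported as total
-- functions Nat → Int / Nat → Bool (inside Pre_ every index Python touches is < 4n, so the
-- function representation computes exactly the same values).  The recursions of _build and
-- update carry a fuel argument; the top-level calls pass fuel = len(nums1), which bounds the
-- segment length e - s at every call, so inside Pre_ the fuel never runs out.

-- ST._apply
def stApply (t : Nat → Int) (lz : Nat → Bool) (i : Nat) (s e : Int) :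
    (Nat → Int) × (Nat → Bool) :=
  if lz i then
    let t' : Nat → Int := fun j => if j = i then (e - s) - t i else t j
    let lz1 : Nat → Bool :=
      if e - s > 1 then
        fun j => if j = 2*i+1 then !(lz (2*i+1)) else if j = 2*i+2 then !(lz (2*i+2)) else lz j
      else lz
    (t', fun j => if j = i then false else lz1 j)
  else (t, lz)

-- ST._build (ST._merge is inlined as + , as in the source)
def stBuild (a : List Int) (fuel : Nat) (i : Nat) (s e : Int) (t : Nat → Int) : Nat → Int :=
  match fuel with
  | 0 => t
  | fuel+1 =>
    if e - s = 1 then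
      -- self.a[s]: inside Pre_ always 0 ≤ s < len a, where pyGetD is exact
      fun j => if j = i then PySem.List.pyGetD a s 0 else t j
    else
      let m := s + PySem.Int.floordiv (e - s) 2
      let t2 := stBuild a fuel (2*i+2) m e (stBuild a fuel (2*i+1) s m t)
      fun j => if j = i then t2 (2*i+1) + t2 (2*i+2) else t2 j

-- ST.update
def stUpdate (fuel : Nat) (i : Nat) (s e l r : Int) (t : Nat → Int) (lz : Nat → Bool) :
    (Nat → Int) × (Nat → Bool) :=
  match fuel with
  | 0 => (t, lz)
  | fuel+1 =>
    let p := stApply t lz i s e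
    if s ≥ r ∨ e ≤ l then p
    else if l ≤ s ∧ e ≤ r then
      stApply p.1 (fun j => if j = i then true else p.2 j) i s e
    else
      let m := s + PySem.Int.floordiv (e - s) 2
      let p1 := stUpdate fuel (2*i+1) s m l r p.1 p.2
      let p2 := stUpdate fuel (2*i+2) m e l r p1.1 p1.2
      (fun j => if j = i then p2.1 (2*i+1) + p2.1 (2*i+2) else p2.1 j, p2.2)

-- body of A's 'for x, y, z in queries' loop; state = (tree, lazy, s, ans)
def aQStep (fuel : Nat) (n : Int) (st : (Nat → Int) × (Nat → Bool) × Int × List Int)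
    (q : List Int) : (Nat → Int) × (Nat → Bool) × Int × List Int :=
  match q with
  | [x, y, z] =>
    if x = 1 then
      let p := stUpdate fuel 0 0 n y (z+1) st.1 st.2.1
      (p.1, p.2, st.2.2.1, st.2.2.2)
    else if x = 2 then (st.1, st.2.1, st.2.2.1 + y * st.1 0, st.2.2.2)
    else (st.1, st.2.1, st.2.2.1, st.2.2.2 ++ [st.2.2.1])
  | _ => st  -- unreachable inside Pre_ (Python raises ValueError when len(q) ≠ 3)

def handleQuery (nums1 : List Int) (nums2 : List Int) (queries : List (List Int)) : List Int :=
  (queries.foldl (aQStep nums1.length (nums1.length : Int))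
    (stBuild nums1 nums1.length 0 0 (nums1.length : Int) (fun _ => 0),
     fun _ => false, nums2.sum, [])).2.2.2

-- ===== PORT B =====
-- B's inner 'for i in range(max(y,0), min(z+1,n))' flip loop; state = (arr, ones).
-- Every i satisfies 0 ≤ i < len(arr), where pyGetD/pySetD are exact for arr[i] / arr[i]=v.
def bFlip (arr : List Int) (ones : Int) (lo hi : Int) : List Int × Int :=
  (PySem.List.pyRange lo hi 1).foldl
    (fun (p : List Int × Int) i =>
      (PySem.List.pySetD p.1 i (1 - PySem.List.pyGetD p.1 i 0),
       p.2 + (1 - 2 * PySem.List.pyGetD p.1 i 0)))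
    (arr, ones)

-- body of B's 'for x, y, z in queries' loop; state = (arr, ones, s, ans)
def bQStep (n : Int) (st : List Int × Int × Int × List Int) (q : List Int) :
    List Int × Int × Int × List Int :=
  match q with
  | [x, y, z] =>
    if x = 1 then
      let p := bFlip st.1 st.2.1 (max y 0) (min (z+1) n)
      (p.1, p.2, st.2.2.1, st.2.2.2)
    else if x = 2 then (st.1, st.2.1, st.2.2.1 + y * st.2.1, st.2.2.2)
    else (st.1, st.2.1, st.2.2.1, st.2.2.2 ++ [st.2.2.1])
  | _ => st  -- unreachable inside Pre_ (Python raises ValueError when len(q) ≠ 3)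

def handleQuery_alt (nums1 : List Int) (nums2 : List Int) (queries : List (List Int)) :
    List Int :=
  (queries.foldl (bQStep (nums1.length : Int))
    (nums1, nums1.sum, nums2.sum, [])).2.2.2

-- ===== PRECONDITION & SPEC =====
-- Pre_ excludes exactly the inputs on which the Python A raises: empty nums1
-- (ST._build recurses forever → RecursionError) and a query whose length is not 3
-- ('for x, y, z in queries' → ValueError).
def Pre_handleQuery (nums1 : List Int) (nums2 : List Int) (queries : List (List Int)) : Prop :=
  nums1 ≠ [] ∧ ∀ q ∈ queries, q.length = 3
instance (nums1 : List Int) (nums2 : List Int) (queries : List (List Int)) :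
    Decidable (Pre_handleQuery nums1 nums2 queries) := by unfold Pre_handleQuery; infer_instance

def pvWitness_handleQuery : List Int × List Int × List (List Int) :=
  ([1, 0, 1], [2], [[1, 0, 1], [2, 3, 0], [3, 0, 0]])

def Spec_handleQuery (nums1 : List Int) (nums2 : List Int) (queries : List (List Int)) (out : List Int) : Prop := out = handleQuery_alt nums1 nums2 queries
instance (nums1 : List Int) (nums2 : List Int) (queries : List (List Int)) (out : List Int) : Decidable (Spec_handleQuery nums1 nums2 queries out) := by unfold Spec_handleQuery; infer_instance

-- ===== CLAIM (what is proved, stated in full; the proofs are below) =====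
def Claim_equal_handleQuery : Prop := ∀ (nums1 : List Int) (nums2 : List Int) (queries : List (List Int)), Dom_handleQuery nums1 nums2 queries → Pre_handleQuery nums1 nums2 queries → Spec_handleQuery nums1 nums2 queries (handleQuery nums1 nums2 queries)

-- ===== LEMMAS AND PROOFS =====

-- j is a node of the subtree rooted at i (heap indexing: children of i are 2i+1, 2i+2)
inductive Desc : Nat → Nat → Prop
  | refl (i : Nat) : Desc i i
  | left {i j : Nat} : Desc (2*i+1) j → Desc i j
  | right {i j : Nat} : Desc (2*i+2) j → Desc i j

theorem Desc_le {i j : Nat} (h : Desc i j) : i ≤ j := by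
  induction h with
  | refl => exact le_refl _
  | left _ ih => omega
  | right _ ih => omega

theorem Desc_inv_aux {x c : Nat} (h : Desc x c) :
    ∀ b : Nat, c = 2*b+1 ∨ c = 2*b+2 → x = c ∨ Desc x b := by
  induction h with
  | refl i => intro b _; exact Or.inl rfl
  | @left i j h ih =>
    intro b hb
    rcases ih b hb with h1 | h2
    · have hib : i = b := by omega
      exact Or.inr (hib ▸ Desc.refl i)
    · exact Or.inr (Desc.left h2)
  | @right i j h ih =>
    intro b hb
    rcases ih b hb with h1 | h2
    · have hib : i = b := by omega
      exact Or.inr (hib ▸ Desc.refl i)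
    · exact Or.inr (Desc.right h2)

theorem Desc_inv_left {a b : Nat} (h : Desc a (2*b+1)) : a = 2*b+1 ∨ Desc a b :=
  Desc_inv_aux h b (Or.inl rfl)

theorem Desc_inv_right {a b : Nat} (h : Desc a (2*b+2)) : a = 2*b+2 ∨ Desc a b :=
  Desc_inv_aux h b (Or.inr rfl)

theorem Desc_total {a b j : Nat} (ha : Desc a j) (hb : Desc b j) :
    Desc a b ∨ Desc b a := by
  induction ha with
  | refl i => exact Or.inr hb
  | @left i j' h ih =>
    rcases ih hb with h1 | h2
    · exact Or.inl (Desc.left h1)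
    · rcases Desc_inv_left h2 with h3 | h4
      · exact Or.inl (h3 ▸ Desc.left (Desc.refl _))
      · exact Or.inr h4
  | @right i j' h ih =>
    rcases ih hb with h1 | h2
    · exact Or.inl (Desc.right h1)
    · rcases Desc_inv_right h2 with h3 | h4
      · exact Or.inl (h3 ▸ Desc.right (Desc.refl _))
      · exact Or.inr h4

theorem Desc_cross {i j : Nat} (h1 : Desc (2*i+1) j) (h2 : Desc (2*i+2) j) : False := by
  rcases Desc_total h1 h2 with h | h
  · rcases Desc_inv_right h with h3 | h4
    · omega
    · have := Desc_le h4; omega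
  · rcases Desc_inv_left h with h3 | h4
    · omega
    · have := Desc_le h4; omega

-- the array obtained from nums1 after all the flips recorded in (tree, lazy),
-- restricted to the segment [s, e) handled by node i
def reprA (t : Nat → Int) (lz : Nat → Bool) : Nat → Nat → Int → Int → List Int
  | 0, _, _, _ => []
  | fuel+1, i, s, e =>
    if e - s = 1 then [if lz i then 1 - t i else t i]
    else
      let m := s + PySem.Int.floordiv (e - s) 2
      let L := reprA t lz fuel (2*i+1) s m
      let R := reprA t lz fuel (2*i+2) m e
      if lz i then (L ++ R).map (fun v => 1 - v) else L ++ R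

-- every internal node's tree entry is the sum of what its children represent
def Cons (t : Nat → Int) (lz : Nat → Bool) : Nat → Nat → Int → Int → Prop
  | 0, _, _, _ => True
  | fuel+1, i, s, e =>
    if e - s = 1 then True
    else
      let m := s + PySem.Int.floordiv (e - s) 2
      t i = (reprA t lz fuel (2*i+1) s m).sum + (reprA t lz fuel (2*i+2) m e).sum
      ∧ Cons t lz fuel (2*i+1) s m ∧ Cons t lz fuel (2*i+2) m e

theorem mid_lt {s e : Int} (h : 2 ≤ e - s) :
    s < s + PySem.Int.floordiv (e - s) 2 ∧ s + PySem.Int.floordiv (e - s) 2 < e := by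
  rw [PySem.Int.floordiv_eq_ediv_of_pos (by omega : (0:Int) < 2)]
  omega

theorem reprA_congr {t t' : Nat → Int} {lz lz' : Nat → Bool} :
    ∀ (f : Nat) (i : Nat) (s e : Int),
    (∀ j, Desc i j → t j = t' j) → (∀ j, Desc i j → lz j = lz' j) →
    reprA t lz f i s e = reprA t' lz' f i s e := by
  intro f
  induction f with
  | zero => intro i s e _ _; rfl
  | succ f ih =>
    intro i s e ht hl
    simp only [reprA]
    rw [ht i (Desc.refl i), hl i (Desc.refl i)]
    by_cases h1 : e - s = 1
    · simp [h1]
    · simp only [h1, if_false]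
      rw [ih (2*i+1) s _ (fun j hj => ht j (Desc.left hj)) (fun j hj => hl j (Desc.left hj)),
          ih (2*i+2) _ e (fun j hj => ht j (Desc.right hj)) (fun j hj => hl j (Desc.right hj))]

theorem Cons_congr {t t' : Nat → Int} {lz lz' : Nat → Bool} :
    ∀ (f : Nat) (i : Nat) (s e : Int),
    (∀ j, Desc i j → t j = t' j) → (∀ j, Desc i j → j ≠ i → lz j = lz' j) →
    Cons t lz f i s e → Cons t' lz' f i s e := by
  intro f
  induction f with
  | zero => intro i s e _ _ h; trivial
  | succ f ih =>
    intro i s e ht hl hc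
    simp only [Cons] at hc ⊢
    by_cases h1 : e - s = 1
    · simp [h1]
    · simp only [h1, if_false] at hc ⊢
      obtain ⟨hsum, hc1, hc2⟩ := hc
      have hlt1 : ∀ j, Desc (2*i+1) j → lz j = lz' j := by
        intro j hj
        exact hl j (Desc.left hj) (by have := Desc_le hj; omega)
      have hlt2 : ∀ j, Desc (2*i+2) j → lz j = lz' j := by
        intro j hj
        exact hl j (Desc.right hj) (by have := Desc_le hj; omega)
      refine ⟨?_, ?_, ?_⟩
      · rw [← ht i (Desc.refl i), hsum,
            reprA_congr f (2*i+1) s _ (fun j hj => ht j (Desc.left hj)) hlt1,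
            reprA_congr f (2*i+2) _ e (fun j hj => ht j (Desc.right hj)) hlt2]
      · exact ih (2*i+1) s _ (fun j hj => ht j (Desc.left hj)) (fun j hj _ => hlt1 j hj) hc1
      · exact ih (2*i+2) _ e (fun j hj => ht j (Desc.right hj)) (fun j hj _ => hlt2 j hj) hc2

theorem length_reprA {t : Nat → Int} {lz : Nat → Bool} :
    ∀ (f : Nat) (i : Nat) (s e : Int), 1 ≤ e - s → e - s ≤ (f : Int) →
    (reprA t lz f i s e).length = (e - s).toNat := by
  intro f
  induction f with
  | zero => intro i s e h1 h2; exfalso; omega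
  | succ f ih =>
    intro i s e h1 h2
    simp only [reprA]
    by_cases hleaf : e - s = 1
    · simp [hleaf]
    · have h2' : 2 ≤ e - s := by omega
      obtain ⟨hm1, hm2⟩ := mid_lt h2'
      simp only [hleaf, if_false]
      have l1 := ih (2*i+1) s (s + PySem.Int.floordiv (e - s) 2) (by omega) (by omega)
      have l2 := ih (2*i+2) (s + PySem.Int.floordiv (e - s) 2) e (by omega) (by omega)
      by_cases hlz : lz i <;>
        simp only [hlz, if_true, if_false, Bool.false_eq_true, List.length_map,
          List.length_append, l1, l2] <;> omega

theorem sum_reprA {t : Nat → Int} {lz : Nat → Bool} {f : Nat} {i : Nat} {s e : Int}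
    (h1 : 1 ≤ e - s) (h2 : e - s ≤ (f : Int)) (hlz : lz i = false)
    (hc : Cons t lz f i s e) : (reprA t lz f i s e).sum = t i := by
  cases f with
  | zero => exfalso; omega
  | succ f =>
    simp only [reprA, Cons] at hc ⊢
    by_cases hleaf : e - s = 1
    · simp [hleaf, hlz]
    · simp only [hleaf, if_false, hlz] at hc ⊢
      simp [hc.1]

theorem sum_map_one_sub (xs : List Int) :
    (xs.map (fun v => 1 - v)).sum = (xs.length : Int) - xs.sum := by
  induction xs with
  | nil => simp
  | cons x tl ih => simp [ih]; ring

theorem reprA_flip_top {t : Nat → Int} {lz lz' : Nat → Bool} :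
    ∀ (f : Nat) (i : Nat) (s e : Int), 1 ≤ e - s → e - s ≤ (f : Int) →
    lz' i = !(lz i) → (∀ j, Desc i j → j ≠ i → lz' j = lz j) →
    reprA t lz' f i s e = (reprA t lz f i s e).map (fun v => 1 - v) := by
  intro f i s e h1 h2 htop hrest
  cases f with
  | zero => exfalso; omega
  | succ f =>
    simp only [reprA]
    by_cases hleaf : e - s = 1
    · simp only [hleaf, if_true]
      cases hlz : lz i <;> simp [hlz] at htop <;> simp [htop]
    · simp only [hleaf, if_false]
      have hL : reprA t lz' f (2*i+1) s (s + PySem.Int.floordiv (e - s) 2)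
          = reprA t lz f (2*i+1) s (s + PySem.Int.floordiv (e - s) 2) :=
        reprA_congr f (2*i+1) s (s + PySem.Int.floordiv (e - s) 2) (fun _ _ => rfl)
          (fun j hj => hrest j (Desc.left hj) (by have := Desc_le hj; omega))
      have hR : reprA t lz' f (2*i+2) (s + PySem.Int.floordiv (e - s) 2) e
          = reprA t lz f (2*i+2) (s + PySem.Int.floordiv (e - s) 2) e :=
        reprA_congr f (2*i+2) (s + PySem.Int.floordiv (e - s) 2) e (fun _ _ => rfl)
          (fun j hj => hrest j (Desc.right hj) (by have := Desc_le hj; omega))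
      rw [hL, hR]
      cases hlz : lz i
      · simp [hlz] at htop; simp [htop]
      · simp [hlz] at htop; simp [htop]

-- ===== flipSeg: the specification of a range flip on a plain list =====
-- flipSeg xs s l r flips (v ↦ 1-v) the entries of xs at absolute positions p
-- (xs occupying positions s, s+1, …) with l ≤ p < r
def flipSeg : List Int → Int → Int → Int → List Int
  | [], _, _, _ => []
  | v :: tl, s, l, r => (if l ≤ s ∧ s < r then 1 - v else v) :: flipSeg tl (s+1) l r

theorem length_flipSeg (xs : List Int) (s l r : Int) :
    (flipSeg xs s l r).length = xs.length := by
  induction xs generalizing s with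
  | nil => rfl
  | cons v tl ih => simp [flipSeg, ih]

theorem getElem_flipSeg (xs : List Int) (s l r : Int) (p : Nat) (hp : p < xs.length) :
    (flipSeg xs s l r)[p]'(by rw [length_flipSeg]; exact hp) =
      if l ≤ s + (p : Int) ∧ s + (p : Int) < r then 1 - xs[p] else xs[p] := by
  induction xs generalizing s p with
  | nil => simp at hp
  | cons v tl ih =>
    cases p with
    | zero => simp [flipSeg]
    | succ p =>
      simp only [flipSeg, List.getElem_cons_succ]
      rw [ih (s+1) p (by simpa using hp)]
      have : s + 1 + (p : Int) = s + ((p : Nat) + 1 : Int) := by ring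
      simp only [this]
      push_cast
      ring_nf

theorem flipSeg_id {xs : List Int} {s l r : Int}
    (h : r ≤ l ∨ r ≤ s ∨ s + (xs.length : Int) ≤ l) : flipSeg xs s l r = xs := by
  apply List.ext_getElem (length_flipSeg xs s l r)
  intro p hp1 hp2
  rw [getElem_flipSeg xs s l r p hp2]
  have : ¬ (l ≤ s + (p : Int) ∧ s + (p : Int) < r) := by
    have : (p : Int) < (xs.length : Int) := by exact_mod_cast hp2
    omega
  simp [this]

theorem flipSeg_full {xs : List Int} {s l r : Int}
    (h1 : l ≤ s) (h2 : s + (xs.length : Int) ≤ r) :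
    flipSeg xs s l r = xs.map (fun v => 1 - v) := by
  apply List.ext_getElem (by simp [length_flipSeg])
  intro p hp1 hp2
  rw [getElem_flipSeg xs s l r p (by rw [length_flipSeg] at hp1; exact hp1)]
  have hcond : l ≤ s + (p : Int) ∧ s + (p : Int) < r := by
    have : (p : Int) < (xs.length : Int) := by
      rw [length_flipSeg] at hp1; exact_mod_cast hp1
    constructor <;> omega
  simp [hcond]

theorem flipSeg_append (xs ys : List Int) (s l r : Int) :
    flipSeg (xs ++ ys) s l r = flipSeg xs s l r ++ flipSeg ys (s + (xs.length : Int)) l r := by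
  induction xs generalizing s with
  | nil => simp [flipSeg]
  | cons v tl ih =>
    simp only [List.cons_append, flipSeg, ih (s+1), List.length_cons]
    have : s + 1 + (tl.length : Int) = s + ((tl.length : Nat) + 1 : Int) := by ring
    rw [this]
    push_cast
    ring_nf

theorem flipSeg_clamp (xs : List Int) (l r : Int) :
    flipSeg xs 0 l r = flipSeg xs 0 (max l 0) (min r (xs.length : Int)) := by
  apply List.ext_getElem (by simp [length_flipSeg])
  intro p hp1 hp2
  rw [length_flipSeg] at hp1
  rw [getElem_flipSeg xs 0 l r p hp1, getElem_flipSeg xs 0 _ _ p hp1]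
  have : (p : Int) < (xs.length : Int) := by exact_mod_cast hp1
  split_ifs with h1 h2 <;> first | rfl | (exfalso; omega)

theorem flipSeg_set (xs : List Int) (lo r : Int) (h0 : 0 ≤ lo)
    (hlt : lo.toNat < xs.length) (hr : lo < r) :
    flipSeg (xs.set lo.toNat (1 - xs[lo.toNat])) 0 (lo+1) r = flipSeg xs 0 lo r := by
  apply List.ext_getElem (by simp [length_flipSeg])
  intro p hp1 hp2
  rw [length_flipSeg, List.length_set] at hp1
  rw [length_flipSeg] at hp2
  rw [getElem_flipSeg _ 0 (lo+1) r p (by simpa using hp1),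
      getElem_flipSeg xs 0 lo r p hp2]
  rw [List.getElem_set]
  have hpx : (p : Int) < (xs.length : Int) := by exact_mod_cast hp2
  by_cases hpe : lo.toNat = p
  · subst hpe
    have hpi : ((lo.toNat : Nat) : Int) = lo := by omega
    split_ifs with h1 h2 <;> first | rfl | (exfalso; omega)
  · simp only [hpe, if_false]
    split_ifs with h1 h2 <;> first | rfl | (exfalso; omega)

theorem sum_set_int (xs : List Int) (p : Nat) (a : Int) (hp : p < xs.length) :
    (xs.set p a).sum = xs.sum - xs[p] + a := by
  induction xs generalizing p with
  | nil => simp at hp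
  | cons v tl ih =>
    cases p with
    | zero => simp [List.set]; ring
    | succ p =>
      simp only [List.set, List.sum_cons, List.getElem_cons_succ]
      rw [ih p (by simpa using hp)]
      ring

-- ===== the three segment-tree lemmas =====

theorem stApply_spec {t : Nat → Int} {lz : Nat → Bool} {f : Nat} {i : Nat} {s e : Int}
    (h1 : 1 ≤ e - s) (h2 : e - s ≤ (f : Int)) (hc : Cons t lz f i s e) :
    reprA (stApply t lz i s e).1 (stApply t lz i s e).2 f i s e = reprA t lz f i s e
    ∧ Cons (stApply t lz i s e).1 (stApply t lz i s e).2 f i s e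
    ∧ (stApply t lz i s e).2 i = false
    ∧ ∀ j, ¬ Desc i j → (stApply t lz i s e).1 j = t j ∧ (stApply t lz i s e).2 j = lz j := by
  cases hlz : lz i with
  | false =>
    have hre : stApply t lz i s e = (t, lz) := by simp [stApply, hlz]
    rw [hre]
    exact ⟨rfl, hc, hlz, fun j _ => ⟨rfl, rfl⟩⟩
  | true =>
    by_cases hleaf : e - s = 1
    · -- leaf: only tree[i] and lazy[i] change
      have hgt : ¬ (e - s > 1) := by omega
      simp only [stApply, hlz, if_true, hgt, if_false]
      cases f with
      | zero => exact absurd h2 (by omega)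
      | succ f =>
        refine ⟨?_, ?_, by simp, ?_⟩
        · simp [reprA, hleaf, hlz]
        · simp [Cons, hleaf]
        · intro j hj
          have hji : j ≠ i := fun h => hj (h ▸ Desc.refl i)
          simp [hji]
    · -- internal: push the flip to both children
      have hgt : e - s > 1 := by omega
      have h2' : 2 ≤ e - s := by omega
      obtain ⟨hm1, hm2⟩ := mid_lt h2'
      cases f with
      | zero => exact absurd h2 (by omega)
      | succ f =>
        simp only [stApply, hlz, if_true, hgt, if_true]
        set m := s + PySem.Int.floordiv (e - s) 2 with hm
        set T : Nat → Int := fun j => if j = i then e - s - t i else t j with hT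
        set LZ : Nat → Bool := fun j =>
          if j = i then false
          else if j = 2*i+1 then !lz (2*i+1) else if j = 2*i+2 then !lz (2*i+2) else lz j
          with hLZ
        have tEq1 : ∀ j, Desc (2*i+1) j → T j = t j := by
          intro j hj
          have hge := Desc_le hj
          have hne : j ≠ i := by omega
          simp only [hT]; rw [if_neg hne]
        have tEq2 : ∀ j, Desc (2*i+2) j → T j = t j := by
          intro j hj
          have hge := Desc_le hj
          have hne : j ≠ i := by omega
          simp only [hT]; rw [if_neg hne]
        have lzc1 : LZ (2*i+1) = !lz (2*i+1) := by
          simp only [hLZ]; rw [if_neg (by omega : 2*i+1 ≠ i)]; simp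
        have lzc2 : LZ (2*i+2) = !lz (2*i+2) := by
          simp only [hLZ]
          rw [if_neg (by omega : 2*i+2 ≠ i), if_neg (by omega : 2*i+2 ≠ 2*i+1)]; simp
        have lzr1 : ∀ j, Desc (2*i+1) j → j ≠ 2*i+1 → LZ j = lz j := by
          intro j hj hjne
          have hge := Desc_le hj
          have hj2 : j ≠ 2*i+2 := by
            intro hj2
            exact Desc_cross (hj2 ▸ hj) (Desc.refl _)
          have hne : j ≠ i := by omega
          simp only [hLZ]; rw [if_neg hne, if_neg hjne, if_neg hj2]
        have lzr2 : ∀ j, Desc (2*i+2) j → j ≠ 2*i+2 → LZ j = lz j := by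
          intro j hj hjne
          have hge := Desc_le hj
          have hj1 : j ≠ 2*i+1 := by
            intro hj1
            exact Desc_cross (Desc.refl _) (hj1 ▸ hj)
          have hne : j ≠ i := by omega
          simp only [hLZ]; rw [if_neg hne, if_neg hj1, if_neg hjne]
        have hL : reprA T LZ f (2*i+1) s m = (reprA t lz f (2*i+1) s m).map (fun v => 1 - v) := by
          rw [reprA_congr (t := T) (t' := t) (lz := LZ) (lz' := LZ) f (2*i+1) s m tEq1
            (fun _ _ => rfl)]
          exact reprA_flip_top f (2*i+1) s m (by omega) (by omega) lzc1 lzr1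
        have hR : reprA T LZ f (2*i+2) m e = (reprA t lz f (2*i+2) m e).map (fun v => 1 - v) := by
          rw [reprA_congr (t := T) (t' := t) (lz := LZ) (lz' := LZ) f (2*i+2) m e tEq2
            (fun _ _ => rfl)]
          exact reprA_flip_top f (2*i+2) m e (by omega) (by omega) lzc2 lzr2
        have hLZi : LZ i = false := by simp [hLZ]
        have hTi : T i = e - s - t i := by simp [hT]
        have lenL := length_reprA (t := t) (lz := lz) f (2*i+1) s m (by omega) (by omega)
        have lenR := length_reprA (t := t) (lz := lz) f (2*i+2) m e (by omega) (by omega)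
        simp only [Cons, hleaf, if_false] at hc
        obtain ⟨hsum, hc1, hc2⟩ := hc
        rw [← hm] at hsum
        refine ⟨?_, ?_, trivial, ?_⟩
        · simp only [reprA, hleaf, if_false, ← hm, hLZi, hlz, Bool.false_eq_true, if_false,
            if_true, hL, hR, List.map_append]
        · simp only [Cons, hleaf, if_false, ← hm]
          refine ⟨?_, ?_, ?_⟩
          · rw [hTi, hL, hR, sum_map_one_sub, sum_map_one_sub, lenL, lenR]
            omega
          · exact Cons_congr (t := T) (t' := T) f (2*i+1) s m (fun _ _ => rfl)
              (fun j hj hjne => (lzr1 j hj hjne).symm)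
              (Cons_congr f (2*i+1) s m (fun j hj => (tEq1 j hj).symm) (fun _ _ _ => rfl) hc1)
          · exact Cons_congr (t := T) (t' := T) f (2*i+2) m e (fun _ _ => rfl)
              (fun j hj hjne => (lzr2 j hj hjne).symm)
              (Cons_congr f (2*i+2) m e (fun j hj => (tEq2 j hj).symm) (fun _ _ _ => rfl) hc2)
        · intro j hj
          have hji : j ≠ i := fun h => hj (h ▸ Desc.refl i)
          have hj1 : j ≠ 2*i+1 := fun h => hj (h ▸ Desc.left (Desc.refl _))
          have hj2 : j ≠ 2*i+2 := fun h => hj (h ▸ Desc.right (Desc.refl _))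
          exact ⟨if_neg hji, by rw [if_neg hji, if_neg hj1, if_neg hj2]⟩


theorem stUpdate_spec :
    ∀ (f : Nat) (i : Nat) (s e l r : Int) (t : Nat → Int) (lz : Nat → Bool),
    1 ≤ e - s → e - s ≤ (f : Int) → Cons t lz f i s e →
    reprA (stUpdate f i s e l r t lz).1 (stUpdate f i s e l r t lz).2 f i s e
      = flipSeg (reprA t lz f i s e) s l r
    ∧ Cons (stUpdate f i s e l r t lz).1 (stUpdate f i s e l r t lz).2 f i s e
    ∧ (stUpdate f i s e l r t lz).2 i = false
    ∧ ∀ j, ¬ Desc i j →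
        (stUpdate f i s e l r t lz).1 j = t j ∧ (stUpdate f i s e l r t lz).2 j = lz j := by
  intro f
  induction f with
  | zero => intro i s e l r t lz h1 h2 _; exfalso; omega
  | succ f ih =>
    intro i s e l r t lz h1 h2 hc
    obtain ⟨ha1, ha2, ha3, ha4⟩ := stApply_spec (f := f+1) h1 h2 hc
    by_cases hdis : s ≥ r ∨ e ≤ l
    · -- query range disjoint from the segment: flipSeg is the identity
      have hre : stUpdate (f+1) i s e l r t lz = stApply t lz i s e := by
        simp only [stUpdate]; rw [if_pos hdis]
      rw [hre]
      refine ⟨?_, ha2, ha3, ha4⟩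
      rw [ha1, flipSeg_id]
      have hlen := length_reprA (t := t) (lz := lz) (f+1) i s e h1 h2
      rcases hdis with hd | hd
      · right; left; omega
      · right; right; rw [hlen]; omega
    · by_cases hcov : l ≤ s ∧ e ≤ r
      · -- segment fully covered: set the lazy flag and re-apply
        have hre : stUpdate (f+1) i s e l r t lz =
            stApply (stApply t lz i s e).1
              (fun j => if j = i then true else (stApply t lz i s e).2 j) i s e := by
          simp only [stUpdate]; rw [if_neg hdis, if_pos hcov]
        rw [hre]
        set p := stApply t lz i s e with hp
        set LZ2 : Nat → Bool := fun j => if j = i then true else p.2 j with hLZ2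
        have hcons2 : Cons p.1 LZ2 (f+1) i s e :=
          Cons_congr (f+1) i s e (fun _ _ => rfl)
            (fun j _ hjne => (if_neg hjne).symm) ha2
        have hrepr2 : reprA p.1 LZ2 (f+1) i s e
            = (reprA p.1 p.2 (f+1) i s e).map (fun v => 1 - v) :=
          reprA_flip_top (f+1) i s e h1 h2 (by simp [hLZ2, ha3])
            (fun j _ hjne => by simp only [hLZ2]; rw [if_neg hjne])
        obtain ⟨hb1, hb2, hb3, hb4⟩ := stApply_spec (f := f+1) h1 h2 hcons2
        refine ⟨?_, hb2, hb3, ?_⟩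
        · rw [hb1, hrepr2, ha1, flipSeg_full hcov.1]
          rw [length_reprA (f+1) i s e h1 h2]
          omega
        · intro j hj
          have hji : j ≠ i := fun h => hj (h ▸ Desc.refl i)
          obtain ⟨hb4a, hb4b⟩ := hb4 j hj
          obtain ⟨ha4a, ha4b⟩ := ha4 j hj
          refine ⟨hb4a.trans ha4a, ?_⟩
          rw [hb4b]; simp only [hLZ2]; rw [if_neg hji]; exact ha4b
      · -- partial overlap: recurse into both children
        have hleaf : ¬ e - s = 1 := by
          intro hleaf
          exact hcov (by omega)
        have hgt2 : 2 ≤ e - s := by omega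
        set m := s + PySem.Int.floordiv (e - s) 2 with hm
        obtain ⟨hm1, hm2⟩ := mid_lt hgt2
        set p := stApply t lz i s e with hp
        set q1 := stUpdate f (2*i+1) s m l r p.1 p.2 with hq1
        set q2 := stUpdate f (2*i+2) m e l r q1.1 q1.2 with hq2
        have hre : stUpdate (f+1) i s e l r t lz =
            (fun j => if j = i then q2.1 (2*i+1) + q2.1 (2*i+2) else q2.1 j, q2.2) := by
          simp only [stUpdate]; rw [if_neg hdis, if_neg hcov]
        rw [hre]
        have hcA := ha2
        simp only [Cons, hleaf, if_false, ← hm] at hcA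
        obtain ⟨hsumA, hcA1, hcA2⟩ := hcA
        have IH1 := ih (2*i+1) s m l r p.1 p.2 (by omega) (by omega) hcA1
        obtain ⟨h11, h12, h13, h14⟩ := IH1
        have hcross1 : ∀ j, Desc (2*i+2) j → ¬ Desc (2*i+1) j :=
          fun j hj hj1 => Desc_cross hj1 hj
        have hcross2 : ∀ j, Desc (2*i+1) j → ¬ Desc (2*i+2) j :=
          fun j hj hj2 => Desc_cross hj hj2
        have hcq1 : Cons q1.1 q1.2 f (2*i+2) m e :=
          Cons_congr f (2*i+2) m e
            (fun j hj => ((h14 j (hcross1 j hj)).1).symm)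
            (fun j hj _ => ((h14 j (hcross1 j hj)).2).symm) hcA2
        have IH2 := ih (2*i+2) m e l r q1.1 q1.2 (by omega) (by omega) hcq1
        obtain ⟨h21, h22, h23, h24⟩ := IH2
        -- lazy flag at the root is clear
        have hnd1 : ¬ Desc (2*i+1) i := fun h => by have := Desc_le h; omega
        have hnd2 : ¬ Desc (2*i+2) i := fun h => by have := Desc_le h; omega
        have hlzi : q2.2 i = false := by
          rw [(h24 i hnd2).2, (h14 i hnd1).2]; exact ha3
        -- the two final children arrays
        have hL : reprA (fun j => if j = i then q2.1 (2*i+1) + q2.1 (2*i+2) else q2.1 j) q2.2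
            f (2*i+1) s m = flipSeg (reprA p.1 p.2 f (2*i+1) s m) s l r := by
          rw [reprA_congr f (2*i+1) s m
            (t' := q2.1) (lz' := q2.2)
            (fun j hj => by rw [if_neg (by have := Desc_le hj; omega : j ≠ i)])
            (fun _ _ => rfl)]
          rw [reprA_congr f (2*i+1) s m
            (t' := q1.1) (lz' := q1.2)
            (fun j hj => (h24 j (hcross2 j hj)).1)
            (fun j hj => (h24 j (hcross2 j hj)).2)]
          exact h11
        have hR : reprA (fun j => if j = i then q2.1 (2*i+1) + q2.1 (2*i+2) else q2.1 j) q2.2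
            f (2*i+2) m e = flipSeg (reprA p.1 p.2 f (2*i+2) m e) m l r := by
          rw [reprA_congr f (2*i+2) m e
            (t' := q2.1) (lz' := q2.2)
            (fun j hj => by rw [if_neg (by have := Desc_le hj; omega : j ≠ i)])
            (fun _ _ => rfl)]
          rw [h21]
          rw [reprA_congr f (2*i+2) m e
            (t' := p.1) (lz' := p.2)
            (fun j hj => (h14 j (hcross1 j hj)).1)
            (fun j hj => (h14 j (hcross1 j hj)).2)]
        have lenL := length_reprA (t := p.1) (lz := p.2) f (2*i+1) s m (by omega) (by omega)
        have hpi : p.2 i = false := ha3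
        refine ⟨?_, ?_, hlzi, ?_⟩
        · -- (a) the represented array is the flipped one
          rw [← ha1]
          simp only [reprA, hleaf, if_false, ← hm, hlzi, hpi, Bool.false_eq_true, if_false]
          rw [hL, hR, flipSeg_append, lenL]
          have : s + ((m - s).toNat : Int) = m := by omega
          rw [this]
        · -- (b) consistency at the new state
          simp only [Cons, hleaf, if_false, ← hm]
          have hq2lz1 : q2.2 (2*i+1) = false := by
            rw [(h24 (2*i+1) (hcross2 _ (Desc.refl _))).2]; exact h13
          have hcq2c1 : Cons q2.1 q2.2 f (2*i+1) s m :=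
            Cons_congr f (2*i+1) s m
              (fun j hj => ((h24 j (hcross2 j hj)).1).symm)
              (fun j hj _ => ((h24 j (hcross2 j hj)).2).symm) h12
          have hsum1 : (reprA q2.1 q2.2 f (2*i+1) s m).sum = q2.1 (2*i+1) := by
            have hval : q2.1 (2*i+1) = q1.1 (2*i+1) := (h24 (2*i+1) (hcross2 _ (Desc.refl _))).1
            exact sum_reprA (by omega) (by omega) hq2lz1 hcq2c1
          have hsum2 : (reprA q2.1 q2.2 f (2*i+2) m e).sum = q2.1 (2*i+2) :=
            sum_reprA (by omega) (by omega) h23 h22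
          refine ⟨?_, ?_, ?_⟩
          · simp only [if_true]
            rw [reprA_congr f (2*i+1) s m (t' := q2.1) (lz' := q2.2)
              (fun j hj => by rw [if_neg (by have := Desc_le hj; omega : j ≠ i)])
              (fun _ _ => rfl)]
            rw [reprA_congr f (2*i+2) m e (t' := q2.1) (lz' := q2.2)
              (fun j hj => by rw [if_neg (by have := Desc_le hj; omega : j ≠ i)])
              (fun _ _ => rfl)]
            rw [hsum1, hsum2]
          · exact Cons_congr f (2*i+1) s m (t := q2.1) (lz := q2.2)
              (fun j hj => by rw [if_neg (by have := Desc_le hj; omega : j ≠ i)])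
              (fun _ _ _ => rfl) hcq2c1
          · exact Cons_congr f (2*i+2) m e (t := q2.1) (lz := q2.2)
              (fun j hj => by rw [if_neg (by have := Desc_le hj; omega : j ≠ i)])
              (fun _ _ _ => rfl) h22
        · -- (d) nothing outside the subtree changes
          intro j hj
          have hji : j ≠ i := fun h => hj (h ▸ Desc.refl i)
          have hjn1 : ¬ Desc (2*i+1) j := fun h => hj (Desc.left h)
          have hjn2 : ¬ Desc (2*i+2) j := fun h => hj (Desc.right h)
          obtain ⟨h24a, h24b⟩ := h24 j hjn2
          obtain ⟨h14a, h14b⟩ := h14 j hjn1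
          obtain ⟨ha4a, ha4b⟩ := ha4 j hj
          constructor
          · show (if j = i then q2.1 (2*i+1) + q2.1 (2*i+2) else q2.1 j) = t j
            rw [if_neg hji, h24a, h14a]; exact ha4a
          · show q2.2 j = lz j
            rw [h24b, h14b]; exact ha4b

theorem stBuild_spec (a : List Int) :
    ∀ (f : Nat) (i : Nat) (s e : Int) (t : Nat → Int),
    1 ≤ e - s → e - s ≤ (f : Int) → 0 ≤ s → e ≤ (a.length : Int) →
    reprA (stBuild a f i s e t) (fun _ => false) f i s e
      = (a.drop s.toNat).take (e - s).toNat
    ∧ Cons (stBuild a f i s e t) (fun _ => false) f i s e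
    ∧ ∀ j, ¬ Desc i j → stBuild a f i s e t j = t j := by
  intro f
  induction f with
  | zero => intro i s e t h1 h2 _ _; exfalso; omega
  | succ f ih =>
    intro i s e t h1 h2 h0s hse
    by_cases hleaf : e - s = 1
    · -- leaf: tree[i] := a[s]
      have hre : stBuild a (f+1) i s e t = fun j => if j = i then PySem.List.pyGetD a s 0 else t j := by
        simp only [stBuild]; rw [if_pos hleaf]
      rw [hre]
      have hslt : s.toNat < a.length := by omega
      refine ⟨?_, by simp [Cons, hleaf], ?_⟩
      · simp only [reprA, hleaf, if_true, Bool.false_eq_true, if_false]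
        rw [PySem.List.pyGetD_eq_getElem a 0 h0s (by omega)]
        rw [List.drop_eq_getElem_cons hslt]
        rfl
      · intro j hj
        have hji : j ≠ i := fun h => hj (h ▸ Desc.refl i)
        simp [hji]
    · -- internal: build both children, then merge
      have hgt2 : 2 ≤ e - s := by omega
      set m := s + PySem.Int.floordiv (e - s) 2 with hm
      obtain ⟨hm1, hm2⟩ := mid_lt hgt2
      set t1 := stBuild a f (2*i+1) s m t with ht1
      set t2 := stBuild a f (2*i+2) m e t1 with ht2
      have hre : stBuild a (f+1) i s e t = fun j => if j = i then t2 (2*i+1) + t2 (2*i+2) else t2 j := by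
        simp only [stBuild]; rw [if_neg hleaf]
      rw [hre]
      obtain ⟨g11, g12, g13⟩ := ih (2*i+1) s m t (by omega) (by omega) h0s (by omega)
      obtain ⟨g21, g22, g23⟩ := ih (2*i+2) m e t1 (by omega) (by omega) (by omega) hse
      have hcross2 : ∀ j, Desc (2*i+1) j → ¬ Desc (2*i+2) j :=
        fun j hj hj2 => Desc_cross hj hj2
      have htF1 : ∀ j, Desc (2*i+1) j → t1 j = (fun j => if j = i then t2 (2*i+1) + t2 (2*i+2) else t2 j) j := by
        intro j hj
        have hge := Desc_le hj
        simp only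
        rw [if_neg (by omega : j ≠ i)]
        exact (g23 j (hcross2 j hj)).symm
      have htF2 : ∀ j, Desc (2*i+2) j → t2 j = (fun j => if j = i then t2 (2*i+1) + t2 (2*i+2) else t2 j) j := by
        intro j hj
        have hge := Desc_le hj
        simp only
        rw [if_neg (by omega : j ≠ i)]
      have hL : reprA (fun j => if j = i then t2 (2*i+1) + t2 (2*i+2) else t2 j)
          (fun _ => false) f (2*i+1) s m = (a.drop s.toNat).take (m - s).toNat := by
        rw [← reprA_congr f (2*i+1) s m htF1 (fun _ _ => rfl)]
        exact g11
      have hR : reprA (fun j => if j = i then t2 (2*i+1) + t2 (2*i+2) else t2 j)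
          (fun _ => false) f (2*i+2) m e = (a.drop m.toNat).take (e - m).toNat := by
        rw [← reprA_congr f (2*i+2) m e htF2 (fun _ _ => rfl)]
        exact g21
      refine ⟨?_, ?_, ?_⟩
      · simp only [reprA, hleaf, if_false, ← hm, Bool.false_eq_true]
        rw [hL, hR]
        have hsplit : (e - s).toNat = (m - s).toNat + (e - m).toNat := by omega
        rw [hsplit, List.take_add, List.drop_drop]
        have : s.toNat + (m - s).toNat = m.toNat := by omega
        rw [this]
      · simp only [Cons, hleaf, if_false, ← hm]
        have hcF1 : Cons (fun j => if j = i then t2 (2*i+1) + t2 (2*i+2) else t2 j)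
            (fun _ => false) f (2*i+1) s m :=
          Cons_congr f (2*i+1) s m htF1 (fun _ _ _ => rfl) g12
        have hcF2 : Cons (fun j => if j = i then t2 (2*i+1) + t2 (2*i+2) else t2 j)
            (fun _ => false) f (2*i+2) m e :=
          Cons_congr f (2*i+2) m e htF2 (fun _ _ _ => rfl) g22
        refine ⟨?_, hcF1, hcF2⟩
        · simp only [if_true]
          rw [sum_reprA (by omega) (by omega) rfl hcF1, sum_reprA (by omega) (by omega) rfl hcF2]
          rw [if_neg (by omega : 2*i+1 ≠ i), if_neg (by omega : 2*i+2 ≠ i)]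
      · intro j hj
        have hji : j ≠ i := fun h => hj (h ▸ Desc.refl i)
        have hjn1 : ¬ Desc (2*i+1) j := fun h => hj (Desc.left h)
        have hjn2 : ¬ Desc (2*i+2) j := fun h => hj (Desc.right h)
        simp only
        rw [if_neg hji, ht2, g23 j hjn2, ht1, g13 j hjn1]

-- ===== B-side loop lemma =====

theorem bFlip_spec :
    ∀ (k : Nat) (lo : Int) (arr : List Int) (ones : Int),
    0 ≤ lo → lo + (k : Int) ≤ (arr.length : Int) → ones = arr.sum →
    bFlip arr ones lo (lo + (k : Int))
      = (flipSeg arr 0 lo (lo + (k : Int)), (flipSeg arr 0 lo (lo + (k : Int))).sum) := by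
  intro k
  induction k with
  | zero =>
    intro lo arr ones h0 hlen hones
    have h00 : lo + ((0 : Nat) : Int) = lo := by push_cast; ring
    rw [h00, flipSeg_id (Or.inl (le_refl lo))]
    unfold bFlip
    rw [PySem.List.pyRange_one_eq_nil (le_refl lo), List.foldl_nil, hones]
  | succ k ihk =>
    intro lo arr ones h0 hlen hones
    have hk : lo + ((k+1 : Nat) : Int) = (lo + 1) + (k : Int) := by push_cast; ring
    rw [hk]
    have hcast : lo + ((k : Nat) : Int) + 1 ≤ (arr.length : Int) := by
      push_cast at hlen ⊢; omega
    have hlo : lo.toNat < arr.length := by omega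
    unfold bFlip
    rw [PySem.List.pyRange_one_cons (by omega), List.foldl_cons,
        PySem.List.pyGetD_eq_getElem arr 0 h0 (by omega),
        PySem.List.pySetD_of_nonneg _ _ h0]
    have hih := ihk (lo+1) (arr.set lo.toNat (1 - arr[lo.toNat]))
      (ones + (1 - 2 * arr[lo.toNat]))
      (by omega)
      (by rw [List.length_set]; omega)
      (by rw [sum_set_int arr lo.toNat _ hlo, hones]; ring)
    unfold bFlip at hih
    rw [hih, flipSeg_set arr lo ((lo + 1) + (k : Int)) h0 hlo (by omega)]

-- ===== the top-level invariant =====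

def StInv (n : Nat) (stA : (Nat → Int) × (Nat → Bool) × Int × List Int)
    (stB : List Int × Int × Int × List Int) : Prop :=
  reprA stA.1 stA.2.1 n 0 0 (n : Int) = stB.1
  ∧ Cons stA.1 stA.2.1 n 0 0 (n : Int)
  ∧ stA.2.1 0 = false
  ∧ stB.2.1 = stB.1.sum
  ∧ stB.1.length = n
  ∧ stA.2.2.1 = stB.2.2.1
  ∧ stA.2.2.2 = stB.2.2.2

theorem qstep_inv {n : Nat} (hn : 1 ≤ n) {stA stB} (q : List Int) (hq : q.length = 3)
    (h : StInv n stA stB) : StInv n (aQStep n (n : Int) stA q) (bQStep (n : Int) stB q) := by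
  obtain ⟨hrep, hcons, hlz0, hones, hlen, hs, hans⟩ := h
  obtain _ | ⟨x, _ | ⟨y, _ | ⟨z, _ | ⟨w, rest⟩⟩⟩⟩ := q
  · simp at hq
  · simp at hq
  · simp at hq
  · simp only [aQStep, bQStep]
    by_cases hx1 : x = 1
    · -- flip query
      rw [if_pos hx1, if_pos hx1]
      obtain ⟨u1, u2, u3, u4⟩ := stUpdate_spec n 0 0 (n : Int) y (z+1) stA.1 stA.2.1
        (by omega) (by omega) hcons
      have hflip : bFlip stB.1 stB.2.1 (max y 0) (min (z+1) (n : Int))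
          = (flipSeg stB.1 0 y (z+1), (flipSeg stB.1 0 y (z+1)).sum) := by
        have hclamp : flipSeg stB.1 0 y (z+1)
            = flipSeg stB.1 0 (max y 0) (min (z+1) (n : Int)) := by
          rw [flipSeg_clamp, hlen]
        by_cases hle : min (z+1) (n : Int) ≤ max y 0
        · rw [hclamp, flipSeg_id (Or.inl hle)]
          unfold bFlip
          rw [PySem.List.pyRange_one_eq_nil hle, List.foldl_nil, hones]
        · have hkk : min (z+1) (n : Int)
              = max y 0 + (((min (z+1) (n : Int)) - max y 0).toNat : Int) := by omega
          rw [hclamp, hkk]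
          exact bFlip_spec _ (max y 0) stB.1 stB.2.1 (by omega) (by omega) hones
      refine ⟨?_, u2, u3, ?_, ?_, hs, hans⟩
      · rw [u1, hrep, hflip]
      · rw [hflip]
      · rw [hflip]
        simp only [length_flipSeg]
        exact hlen
    · by_cases hx2 : x = 2
      · -- weighted-sum query: tree[0] = ones
        rw [if_neg hx1, if_neg hx1, if_pos hx2, if_pos hx2]
        refine ⟨hrep, hcons, hlz0, hones, hlen, ?_, hans⟩
        have hroot : stA.1 0 = stB.2.1 := by
          have hsr := sum_reprA (t := stA.1) (lz := stA.2.1) (f := n) (i := 0) (s := 0)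
            (e := (n : Int)) (by omega) (by omega) hlz0 hcons
          rw [hrep] at hsr
          rw [hones, ← hsr]
        rw [hs, hroot]
      · rw [if_neg hx1, if_neg hx1, if_neg hx2, if_neg hx2]
        exact ⟨hrep, hcons, hlz0, hones, hlen, hs, by rw [hans, hs]⟩
  · simp at hq

theorem fold_inv {n : Nat} (hn : 1 ≤ n) :
    ∀ (qs : List (List Int)) (stA : (Nat → Int) × (Nat → Bool) × Int × List Int)
      (stB : List Int × Int × Int × List Int),
    (∀ q ∈ qs, q.length = 3) → StInv n stA stB →
    StInv n (qs.foldl (aQStep n (n : Int)) stA) (qs.foldl (bQStep (n : Int)) stB) := by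
  intro qs
  induction qs with
  | nil => intro stA stB _ h; exact h
  | cons q tl ih =>
    intro stA stB hq h
    simp only [List.foldl_cons]
    exact ih _ _ (fun q' hq' => hq q' (List.mem_cons_of_mem _ hq'))
      (qstep_inv hn q (hq q (List.mem_cons_self ..)) h)

-- ===== VERDICT (by name: the statement is the Claim_ definition above) =====
theorem handleQuery_spec : Claim_equal_handleQuery := by
  intro nums1 nums2 queries _ hpre
  obtain ⟨hne, hq⟩ := hpre
  unfold Spec_handleQuery handleQuery handleQuery_alt
  have hn : 1 ≤ nums1.length := by
    cases nums1 with
    | nil => exact absurd rfl hne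
    | cons _ _ => simp
  have hb := stBuild_spec nums1 nums1.length 0 0 (nums1.length : Int) (fun _ => 0)
    (by omega) (by omega) (by omega) (by omega)
  have hinit : StInv nums1.length
      (stBuild nums1 nums1.length 0 0 (nums1.length : Int) (fun _ => 0),
        fun _ => false, nums2.sum, [])
      (nums1, nums1.sum, nums2.sum, []) := by
    refine ⟨?_, hb.2.1, rfl, rfl, rfl, rfl, rfl⟩
    have := hb.1
    simpa using this
  have := fold_inv hn queries _ _ hq hinit
  exact this.2.2.2.2.2.2
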